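-- pv_equiv track=rewrite | github.com/netneurolab/neuromaps-mouse | neuromaps_mouse/resampling.py | _get_nearest_descendant_region_allenccfv3
-- ===== SOURCE A (Python) =====
-- def _get_nearest_descendant_region_allenccfv3(
--     source_region_ids, target_structure_id_paths, include_self=True
-- ):
--     matched_region_ids = []
--
--     if include_self:
--         tp_list = [
--             list(map(int, tp.split("/")[2:-1])) for tp in target_structure_id_paths
--         ]
--     else:
--         tp_list = [
--             list(map(int, tp.split("/")[2:-2])) for tp in target_structure_id_paths
--         ]
--
--     for p in source_region_ids:
--         if p is None:
--             matched_region_ids.append([])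
--             continue
--         p_in_tp = [_[-1] for _ in tp_list if p in _]
--
--         matched_region_ids.append(p_in_tp)
--
--     return matched_region_ids
-- ===== SOURCE B (Python) =====
-- def _get_nearest_descendant_region_allenccfv3(
--     source_region_ids, target_structure_id_paths, include_self=True
-- ):
--     end = -1 if include_self else -2
--     index = {}
--     for tp in target_structure_id_paths:
--         parts = [int(x) for x in tp.split("/")[2:end]]
--         if parts:
--             last = parts[-1]
--             for rid in dict.fromkeys(parts):
--                 index[rid] = index.get(rid, []) + [last]
--     return [[] if p is None else list(index.get(p, []))
--             for p in source_region_ids]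
-- ===== Notes on version B (the rewrite author's own statement) =====
-- stated objective: faster
-- what changed: Instead of scanning every parsed target path for each source id (nested loops), B builds in one pass a dict mapping each region id occurring in a path (dedup per path) to the list of that path's last elements, then answers each source id by a single dict lookup.
import Mathlib
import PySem

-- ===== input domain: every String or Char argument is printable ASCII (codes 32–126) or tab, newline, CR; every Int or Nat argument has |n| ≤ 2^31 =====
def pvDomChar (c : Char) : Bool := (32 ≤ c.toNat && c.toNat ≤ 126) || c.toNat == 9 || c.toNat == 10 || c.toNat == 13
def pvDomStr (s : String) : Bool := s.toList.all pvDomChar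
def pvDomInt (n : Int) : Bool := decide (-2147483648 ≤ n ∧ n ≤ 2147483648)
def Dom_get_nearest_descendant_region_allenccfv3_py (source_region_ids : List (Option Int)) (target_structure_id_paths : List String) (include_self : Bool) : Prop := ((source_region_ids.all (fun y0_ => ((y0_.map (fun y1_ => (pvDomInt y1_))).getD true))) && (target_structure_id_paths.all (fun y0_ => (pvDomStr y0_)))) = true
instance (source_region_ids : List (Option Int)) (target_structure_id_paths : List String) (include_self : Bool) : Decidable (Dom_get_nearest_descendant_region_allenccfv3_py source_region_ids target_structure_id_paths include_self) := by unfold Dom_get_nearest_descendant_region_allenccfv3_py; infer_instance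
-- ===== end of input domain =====

-- B replaces A's per-source-id scan of all parsed target paths by a dict (region id -> list
-- of path last-elements, dedup per path) built in one pass, then answers by lookup: asymptotically faster.

-- shared helper: tp.split("/")[2:-1] (include_self) resp. [2:-2], used by both ports and Pre_
def pvSegs (include_self : Bool) (tp : String) : List String :=
  PySem.List.slice ((PySem.Str.split? tp "/").getD []) (some 2)
    (some (if include_self then -1 else -2))

-- int(x); Pre_ guarantees the parse succeeds, so the default is never taken inside Pre_
def pvInt (s : String) : Int := (PySem.Int.ofStr? s).getD 0

-- ===== PORT A =====
def get_nearest_descendant_region_allenccfv3_py (source_region_ids : List (Option Int)) (target_structure_id_paths : List String) (include_self : Bool) : List (List Int) :=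
  let tp_list :=
    if include_self then
      target_structure_id_paths.map (fun tp => (pvSegs true tp).map pvInt)
    else
      target_structure_id_paths.map (fun tp => (pvSegs false tp).map pvInt)
  source_region_ids.foldl (fun acc p =>
    match p with
    | none => acc ++ [[]]
    | some p =>
        acc ++ [(tp_list.filter (fun l => decide (p ∈ l))).map
                  (fun l => (PySem.List.pyGet? l (-1)).getD 0)]) []

-- ===== PORT B =====
def get_nearest_descendant_region_allenccfv3_py_alt (source_region_ids : List (Option Int)) (target_structure_id_paths : List String) (include_self : Bool) : List (List Int) :=
  let index : PySem.Dict Int (List Int) :=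
    target_structure_id_paths.foldl (fun d tp =>
      let parts := (pvSegs include_self tp).map pvInt
      match parts.getLast? with
      | none => d
      | some last =>
          (PySem.List.dedup parts).foldl
            (fun d rid => d.modify rid [] (· ++ [last])) d) PySem.Dict.empty
  source_region_ids.map (fun p =>
    match p with
    | none => []
    | some p => index.getD p [])

-- ===== PRECONDITION & SPEC =====
-- Pre_ excludes exactly the inputs where Python A raises ValueError: some selected path
-- segment is not parseable by int().
def Pre_get_nearest_descendant_region_allenccfv3_py (source_region_ids : List (Option Int)) (target_structure_id_paths : List String) (include_self : Bool) : Prop :=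
  ∀ tp ∈ target_structure_id_paths, ∀ s ∈ pvSegs include_self tp, (PySem.Int.ofStr? s).isSome
instance (source_region_ids : List (Option Int)) (target_structure_id_paths : List String) (include_self : Bool) : Decidable (Pre_get_nearest_descendant_region_allenccfv3_py source_region_ids target_structure_id_paths include_self) := by unfold Pre_get_nearest_descendant_region_allenccfv3_py; infer_instance

def pvWitness_get_nearest_descendant_region_allenccfv3_py : List (Option Int) × List String × Bool :=
  ([some 1, none, some 2], ["/997/1/2/", "/997/2/"], true)

def Spec_get_nearest_descendant_region_allenccfv3_py (source_region_ids : List (Option Int)) (target_structure_id_paths : List String) (include_self : Bool) (out : List (List Int)) : Prop := out = get_nearest_descendant_region_allenccfv3_py_alt source_region_ids target_structure_id_paths include_self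
instance (source_region_ids : List (Option Int)) (target_structure_id_paths : List String) (include_self : Bool) (out : List (List Int)) : Decidable (Spec_get_nearest_descendant_region_allenccfv3_py source_region_ids target_structure_id_paths include_self out) := by unfold Spec_get_nearest_descendant_region_allenccfv3_py; infer_instance

-- ===== CLAIM (what is proved, stated in full; the proofs are below) =====
def Claim_equal_get_nearest_descendant_region_allenccfv3_py : Prop := ∀ (source_region_ids : List (Option Int)) (target_structure_id_paths : List String) (include_self : Bool), Dom_get_nearest_descendant_region_allenccfv3_py source_region_ids target_structure_id_paths include_self → Pre_get_nearest_descendant_region_allenccfv3_py source_region_ids target_structure_id_paths include_self → Spec_get_nearest_descendant_region_allenccfv3_py source_region_ids target_structure_id_paths include_self (get_nearest_descendant_region_allenccfv3_py source_region_ids target_structure_id_paths include_self)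

-- ===== LEMMAS AND PROOFS =====

-- Python's parts[-1] on a nonempty list is getLast?
theorem pv_pyGet_neg_one (tp : List Int) (h : tp ≠ []) :
    PySem.List.pyGet? tp (-1) = tp.getLast? := by
  have hl : 0 < tp.length := List.length_pos_of_ne_nil h
  simp only [PySem.List.pyGet?, PySem.List.pyIdx?]
  rw [if_neg (by norm_num), if_pos (by omega)]
  simp [List.getLast?_eq_getElem?]

-- the inner dict loop over one path's ids appends `v` once per occurrence
theorem pv_fold_modify (ids : List Int) (v : Int) (d : PySem.Dict Int (List Int)) (p : Int) :
    (ids.foldl (fun d rid => d.modify rid [] (· ++ [v])) d).getD p []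
      = d.getD p [] ++ List.replicate (ids.count p) v := by
  induction ids generalizing d with
  | nil => simp
  | cons rid rest ih =>
    simp only [List.foldl_cons, ih, PySem.Dict.getD_modify, List.count_cons]
    by_cases h : p = rid
    · simp [h, List.replicate_succ]
    · simp [h, Ne.symm h]

-- one path's contribution to the dict, as seen by a lookup of p
theorem pv_step (parts : List Int) (d : PySem.Dict Int (List Int)) (p : Int) :
    ((match parts.getLast? with
      | none => d
      | some last =>
          (PySem.List.dedup parts).foldl
            (fun d rid => d.modify rid [] (· ++ [last])) d) : PySem.Dict Int (List Int)).getD p []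
      = d.getD p [] ++ (if p ∈ parts then [(PySem.List.pyGet? parts (-1)).getD 0] else []) := by
  rcases h : parts.getLast? with _ | last
  · have hp : parts = [] := List.getLast?_eq_none_iff.mp h
    simp [hp]
  · have hne : parts ≠ [] := by intro hc; rw [hc] at h; simp at h
    simp only [pv_fold_modify]
    by_cases hp : p ∈ parts
    · rw [pv_pyGet_neg_one parts hne, h]
      simp [hp, List.replicate_succ]
    · have hcnt : (PySem.List.dedup parts).count p = 0 :=
        List.count_eq_zero_of_not_mem
          (fun hc => hp ((PySem.List.mem_dedup parts p).mp hc))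
      simp only [PySem.List.dedup_eq_ofList] at hcnt
      simp [hp, hcnt]

-- the whole dict-building loop over the target paths: a lookup of p yields exactly
-- A's filtered last-elements, in path order
theorem pv_build (inc : Bool) (tgts : List String) (d : PySem.Dict Int (List Int)) (p : Int) :
    (tgts.foldl (fun d tp =>
        let parts := (pvSegs inc tp).map pvInt
        match parts.getLast? with
        | none => d
        | some last =>
            (PySem.List.dedup parts).foldl
              (fun d rid => d.modify rid [] (· ++ [last])) d) d).getD p []
      = d.getD p []
        ++ ((tgts.map (fun tp => (pvSegs inc tp).map pvInt)).filter
              (fun l => decide (p ∈ l))).map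
             (fun l => (PySem.List.pyGet? l (-1)).getD 0) := by
  induction tgts generalizing d with
  | nil => simp
  | cons tp rest ih =>
    simp only [List.foldl_cons, List.map_cons, List.filter_cons]
    rw [ih, pv_step]
    by_cases hp : p ∈ (pvSegs inc tp).map pvInt <;> simp [hp]

-- A's accumulator loop, rewritten against B's dict lookups
theorem pv_main (inc : Bool) (tgts : List String) (src : List (Option Int))
    (acc : List (List Int)) :
    src.foldl (fun acc p =>
      match p with
      | none => acc ++ [[]]
      | some p =>
          acc ++ [(((tgts.map (fun tp => (pvSegs inc tp).map pvInt)).filter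
                      (fun l => decide (p ∈ l))).map
                     (fun l => (PySem.List.pyGet? l (-1)).getD 0))]) acc
      = acc ++ src.map (fun p =>
          match p with
          | none => ([] : List Int)
          | some p =>
              (tgts.foldl (fun d tp =>
                  let parts := (pvSegs inc tp).map pvInt
                  match parts.getLast? with
                  | none => d
                  | some last =>
                      (PySem.List.dedup parts).foldl
                        (fun d rid => d.modify rid [] (· ++ [last])) d)
                PySem.Dict.empty).getD p []) := by
  induction src generalizing acc with
  | nil => simp
  | cons q rest ih =>
    cases q with
    | none => simp [ih]
    | some p =>
      simp only [List.foldl_cons, List.map_cons, ih, List.append_assoc, List.cons_append,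
        List.nil_append]
      rw [pv_build inc tgts PySem.Dict.empty p]
      simp

-- ===== VERDICT (by name: the statement is the Claim_ definition above) =====
theorem get_nearest_descendant_region_allenccfv3_py_spec : Claim_equal_get_nearest_descendant_region_allenccfv3_py := by
  intro src tgts inc _ _
  unfold Spec_get_nearest_descendant_region_allenccfv3_py
  unfold get_nearest_descendant_region_allenccfv3_py get_nearest_descendant_region_allenccfv3_py_alt
  simp only
  have hT : (if inc = true then tgts.map (fun tp => (pvSegs true tp).map pvInt)
             else tgts.map (fun tp => (pvSegs false tp).map pvInt))
          = tgts.map (fun tp => (pvSegs inc tp).map pvInt) := by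
    cases inc <;> rfl
  rw [hT]
  simpa using pv_main inc tgts src []
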